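-- pv_equiv track=rewrite | github.com/spencerho777/Programming-Contests | Facebook Hacker Cup/Round 1/a2brute.py | solve
-- ===== SOURCE A (Python) =====
-- def solve(w):
--     switch = 0
--     firstO, firstX = w.find("O"), w.find("X")
--     if firstO == -1 or (firstX < firstO and firstX != -1):
--         onX = True
--     else:
--         onX = False
--     for char in w:
--
--         if char == "X":
--             if not onX:
--                 switch += 1
--                 onX = True
--         elif char == "O":
--             if onX:
--                 switch += 1
--                 onX = False
--
--     return switch
-- ===== SOURCE B (Python) =====
-- def solve(w):
--     s = [c for c in w if c == "X" or c == "O"]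
--     return sum(1 for a, b in zip(s, s[1:]) if a != b)
-- ===== Notes on version B (the rewrite author's own statement) =====
-- stated objective: simpler
-- what changed: Replaces the find()-based initial-state computation and stateful boolean toggle with a stateless pipeline: filter the X/O letters and count adjacent unequal pairs via zip.
import Mathlib
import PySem

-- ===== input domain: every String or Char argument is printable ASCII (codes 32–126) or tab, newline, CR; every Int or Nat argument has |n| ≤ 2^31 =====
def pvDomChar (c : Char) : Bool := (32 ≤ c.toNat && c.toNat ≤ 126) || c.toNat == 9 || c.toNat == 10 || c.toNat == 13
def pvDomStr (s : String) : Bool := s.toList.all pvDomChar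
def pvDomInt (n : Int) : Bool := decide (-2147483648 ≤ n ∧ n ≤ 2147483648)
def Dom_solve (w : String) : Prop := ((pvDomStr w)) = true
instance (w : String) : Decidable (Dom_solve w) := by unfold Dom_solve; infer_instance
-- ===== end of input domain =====

-- B replaces A's find()-based initial state and boolean toggle by a stateless pipeline
-- (filter the X/O letters, count adjacent unequal pairs): simpler, same O(n) cost.

-- ===== PORT A =====
def solve (w : String) : Int :=
  let firstO : Int := PySem.Str.find w "O"
  let firstX : Int := PySem.Str.find w "X"
  let onX : Bool := if firstO = -1 ∨ (firstX < firstO ∧ firstX ≠ -1) then true else false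
  (w.toList.foldl (fun (st : Int × Bool) c =>
      if c = 'X' then (if !st.2 then (st.1 + 1, true) else st)
      else if c = 'O' then (if st.2 then (st.1 + 1, false) else st)
      else st) (0, onX)).1

-- ===== PORT B =====
def solve_alt (w : String) : Int :=
  let s := w.toList.filter (fun c => decide (c = 'X') || decide (c = 'O'))
  ((s.zip (PySem.List.slice s (some 1) none)).countP (fun p => decide (p.1 ≠ p.2)) : Int)

-- ===== PRECONDITION & SPEC =====
def Spec_solve (w : String) (out : Int) : Prop := out = solve_alt w
instance (w : String) (out : Int) : Decidable (Spec_solve w out) := by unfold Spec_solve; infer_instance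

-- ===== CLAIM (what is proved, stated in full; the proofs are below) =====
def Claim_equal_solve : Prop := ∀ (w : String), Dom_solve w → Spec_solve w (solve w)

-- ===== LEMMAS AND PROOFS =====

-- the letter test of B's filter
def pvIsXO (c : Char) : Bool := decide (c = 'X') || decide (c = 'O')

-- number of state switches of A's loop, starting from state b, over an X/O-only list
def pvChg (b : Bool) : List Char → Int
  | [] => 0
  | k :: ks => (if decide (k = 'X') ≠ b then 1 else 0) + pvChg (decide (k = 'X')) ks

-- A's loop, on any list, counts the switches over the filtered letters
theorem pvFold_eq (l : List Char) (s : Int) (b : Bool) :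
    (l.foldl (fun (st : Int × Bool) c =>
      if c = 'X' then (if !st.2 then (st.1 + 1, true) else st)
      else if c = 'O' then (if st.2 then (st.1 + 1, false) else st)
      else st) (s, b)).1 = s + pvChg b (l.filter pvIsXO) := by
  induction l generalizing s b with
  | nil => simp [pvChg]
  | cons c l ih =>
    rw [List.foldl_cons]
    by_cases hx : c = 'X'
    · subst hx
      cases b
      · show (List.foldl _ (s + 1, true) l).1 = _
        rw [ih]; simp [pvIsXO, pvChg]; ring
      · show (List.foldl _ (s, true) l).1 = _
        rw [ih]; simp [pvIsXO, pvChg]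
    · by_cases ho : c = 'O'
      · subst ho
        cases b
        · show (List.foldl _ (s, false) l).1 = _
          rw [ih]; simp [pvIsXO, pvChg]
        · show (List.foldl _ (s + 1, false) l).1 = _
          rw [ih]; simp [pvIsXO, pvChg]; ring
      · rw [if_neg hx, if_neg ho, ih]
        have : pvIsXO c = false := by simp [pvIsXO, hx, ho]
        simp [this]

-- B's count of adjacent unequal pairs
def pvPc (ks : List Char) : Int :=
  ((ks.zip ks.tail).countP (fun p => decide (p.1 ≠ p.2)) : Int)

-- on an X/O-only list, the switch count from state b is the pair count plus a first-letter correction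
theorem pvChg_eq (ks : List Char) (b : Bool) (h : ∀ k ∈ ks, k = 'X' ∨ k = 'O') :
    pvChg b ks = pvPc ks +
      (match ks with
       | [] => (0 : Int)
       | k :: _ => if decide (k = 'X') ≠ b then 1 else 0) := by
  induction ks generalizing b with
  | nil => simp [pvChg, pvPc]
  | cons k ks ih =>
    have hk : k = 'X' ∨ k = 'O' := h k (by simp)
    have h' : ∀ x ∈ ks, x = 'X' ∨ x = 'O' := fun x hx => h x (by simp [hx])
    rw [pvChg, ih _ h']
    cases ks with
    | nil => simp [pvPc]
    | cons k' t =>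
      have hk' : k' = 'X' ∨ k' = 'O' := h' k' (by simp)
      have hcnt : pvPc (k :: k' :: t) = (if decide (k ≠ k') then 1 else 0) + pvPc (k' :: t) := by
        simp only [pvPc, List.tail_cons, List.zip_cons_cons, List.countP_cons]
        push_cast
        ring
      rw [hcnt]
      have hiff : (decide (k' = 'X') ≠ decide (k = 'X')) ↔ (k ≠ k') := by
        rcases hk with rfl | rfl <;> rcases hk' with rfl | rfl <;> simp
      by_cases hne : k ≠ k'
      · simp only [hiff.mpr hne, hne, ne_eq]
        split <;> ring_nf <;> simp_all
      · have heq : k = k' := by tauto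
        subst heq
        simp only [ne_eq, not_true_eq_false, decide_false]
        split <;> ring_nf <;> simp_all

-- a singleton prefix is a statement about the head
theorem pvSingleton_prefix (t : List Char) (c : Char) : [c] <+: t ↔ t.head? = some c := by
  cases t with
  | nil => simp
  | cons x xs => simp [List.cons_prefix_cons, eq_comm]

-- occurrence of c at index j, as find-speak
theorem pvPrefix_drop (l : List Char) (j : Nat) (c : Char) :
    [c] <+: l.drop j ↔ l[j]? = some c := by
  rw [pvSingleton_prefix, List.head?_drop]

-- A's initial state matches the first X/O letter of w
theorem pvInit_eq (cs : List Char) (hd : Char) (tl : List Char)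
    (hf : cs.filter pvIsXO = hd :: tl) :
    (if PySem.Chars.find cs ['O'] = -1 ∨
        (PySem.Chars.find cs ['X'] < PySem.Chars.find cs ['O'] ∧ PySem.Chars.find cs ['X'] ≠ -1)
     then true else false) = decide (hd = 'X') := by
  obtain ⟨pre, suf, hcs, hpre, phd, -⟩ := List.filter_eq_cons_iff.mp hf
  have hhd : hd = 'X' ∨ hd = 'O' := by
    simp only [pvIsXO, Bool.or_eq_true, decide_eq_true_eq] at phd; exact phd
  -- cs[pre.length] = hd
  have hat : cs[pre.length]? = some hd := by
    subst hcs; simp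
  -- any index below pre.length holds a non-letter
  have hlow : ∀ j, j < pre.length → ∀ c, cs[j]? = some c → pvIsXO c = false := by
    intro j hj c hc
    subst hcs
    rw [List.getElem?_append_left hj] at hc
    have : c ∈ pre := List.mem_of_getElem? hc
    exact Bool.not_eq_true _ ▸ (hpre c this)
  -- letters are in cs
  have hmem : hd ∈ cs := by subst hcs; simp
  set f := PySem.Chars.find cs ['X'] with hfX
  set g := PySem.Chars.find cs ['O'] with hgO
  rcases hhd with rfl | rfl
  · -- first letter is 'X'
    have hfpos : 0 ≤ f := (PySem.Chars.find_nonneg_iff cs ['X']).mpr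
      ((List.singleton_infix_iff 'X' cs).mpr hmem)
    obtain ⟨hocc, hmin⟩ := PySem.Chars.find_spec hfpos
    -- f ≤ pre.length
    have hfle : f.toNat ≤ pre.length := by
      by_contra hgt
      exact hmin pre.length (by omega) ((pvPrefix_drop cs pre.length 'X').mpr hat)
    by_cases hg : g = -1
    · simp [hg]
    · have hgpos : 0 ≤ g := by
        have := PySem.Chars.neg_one_le_find cs ['O']
        rw [← hgO] at this; omega
      obtain ⟨gocc, -⟩ := PySem.Chars.find_spec hgpos
      have hgat : cs[g.toNat]? = some 'O' := (pvPrefix_drop cs g.toNat 'O').mp gocc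
      have hgge : ¬ g.toNat < pre.length := by
        intro hlt
        have := hlow g.toNat hlt 'O' hgat
        simp [pvIsXO] at this
      have hgne : g.toNat ≠ pre.length := by
        intro he; rw [he, hat] at hgat; simp at hgat
      have hlt : f < g := by omega
      have hfne1 : f ≠ -1 := by omega
      simp [hlt, hg, hfne1]
  · -- first letter is 'O'
    have hgpos : 0 ≤ g := (PySem.Chars.find_nonneg_iff cs ['O']).mpr
      ((List.singleton_infix_iff 'O' cs).mpr hmem)
    obtain ⟨-, gmin⟩ := PySem.Chars.find_spec hgpos
    have hgle : g.toNat ≤ pre.length := by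
      by_contra hgt
      exact gmin pre.length (by omega) ((pvPrefix_drop cs pre.length 'O').mpr hat)
    have hg : g ≠ -1 := by omega
    by_cases hf : f = -1
    · simp [hf, hg]
    · have hfpos : 0 ≤ f := by
        have := PySem.Chars.neg_one_le_find cs ['X']
        rw [← hfX] at this; omega
      obtain ⟨focc, -⟩ := PySem.Chars.find_spec hfpos
      have hfat : cs[f.toNat]? = some 'X' := (pvPrefix_drop cs f.toNat 'X').mp focc
      have hfge : ¬ f.toNat < pre.length := by
        intro hlt
        have := hlow f.toNat hlt 'X' hfat
        simp [pvIsXO] at this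
      have hfne : f.toNat ≠ pre.length := by
        intro he; rw [he, hat] at hfat; simp at hfat
      have : ¬ f < g := by omega
      simp [this, hg]

-- ===== VERDICT (by name: the statement is the Claim_ definition above) =====
theorem solve_spec : Claim_equal_solve := by
  intro w _
  unfold Spec_solve solve solve_alt
  simp only [PySem.Str.find_eq]
  rw [pvFold_eq]
  simp only [show "O".toList = ['O'] from by decide, show "X".toList = ['X'] from by decide]
  set cs := w.toList
  have hfilter : cs.filter (fun c => decide (c = 'X') || decide (c = 'O')) = cs.filter pvIsXO := by
    rfl
  rw [hfilter, PySem.List.slice_from_one]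
  cases hc : cs.filter pvIsXO with
  | nil => simp [pvChg]
  | cons hd tl =>
    have hmem : ∀ k ∈ (hd :: tl), k = 'X' ∨ k = 'O' := by
      intro k hk
      rw [← hc] at hk
      have := List.of_mem_filter hk
      simp only [pvIsXO, Bool.or_eq_true, decide_eq_true_eq] at this
      exact this
    rw [pvChg_eq _ _ hmem]
    rw [pvInit_eq cs hd tl hc]
    simp [pvPc]
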